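-- pv_equiv track=rewrite | github.com/Data-MaSTeRR/codetree-TILs | 241005/함수를 이용한 합과 소수 판별/use-functions-to-determine-sums-and-decimals.py | check_sumEven
-- ===== SOURCE A (Python) =====
-- def check_sumEven(n):
--
--     cum_sum = 0
--     while n:
--         cum_sum += (n % 10)
--         n //= 10
--
--     if cum_sum % 2 == 0:
--         return True
--
--     return False
-- ===== SOURCE B (Python) =====
-- def check_sumEven(n):
--     return sum(int(c) for c in str(n)) % 2 == 0
-- ===== Notes on version B (the rewrite author's own statement) =====
-- stated objective: idiomatic
-- what changed: B sums the digits by iterating over the decimal string representation instead of A's mod-10/floor-div-10 arithmetic loop, and returns the parity test directly instead of an if/return-True/False chain.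
import Mathlib
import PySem

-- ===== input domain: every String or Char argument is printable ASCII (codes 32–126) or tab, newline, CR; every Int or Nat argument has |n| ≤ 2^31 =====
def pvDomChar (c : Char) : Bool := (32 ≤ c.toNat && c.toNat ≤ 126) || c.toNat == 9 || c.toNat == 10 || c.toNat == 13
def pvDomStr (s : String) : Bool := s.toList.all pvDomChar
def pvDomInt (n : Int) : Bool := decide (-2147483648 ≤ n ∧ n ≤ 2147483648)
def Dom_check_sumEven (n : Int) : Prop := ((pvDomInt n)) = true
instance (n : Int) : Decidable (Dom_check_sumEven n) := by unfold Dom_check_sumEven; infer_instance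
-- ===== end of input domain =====

-- B replaces A's mod-10/floor-div-10 arithmetic loop by an idiomatic pass over str(n)'s characters.


-- ===== PORT A =====
-- the while loop, fuel = n.natAbs + 1 (enough for every n ≥ 0; fuel only makes the loop total)
def check_sumEvenLoop (fuel : Nat) (n cum : Int) : Int :=
  match fuel with
  | 0 => cum
  | f + 1 =>
    if n = 0 then cum
    else check_sumEvenLoop f (PySem.Int.floordiv n 10) (cum + PySem.Int.mod n 10)

def check_sumEven (n : Int) : Bool :=
  let cum := check_sumEvenLoop (n.natAbs + 1) n 0
  if PySem.Int.mod cum 2 = 0 then true else false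

-- ===== PORT B =====
-- sum(int(c) for c in str(n)) % 2 == 0;  int(c) is PySem.Int.ofChars? [c] (never none on a digit)
def check_sumEven_alt (n : Int) : Bool :=
  decide (PySem.Int.mod
    (((PySem.Int.toStr n).toList.map (fun c => (PySem.Int.ofChars? [c]).getD 0)).sum) 2 = 0)

-- ===== PRECONDITION & SPEC =====
-- Pre_ excludes negative n, on which A's while-loop never terminates (n // 10 stays at -1 forever).
def Pre_check_sumEven (n : Int) : Prop := 0 ≤ n
instance (n : Int) : Decidable (Pre_check_sumEven n) := by unfold Pre_check_sumEven; infer_instance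
def pvWitness_check_sumEven : Int := (1234)

def Spec_check_sumEven (n : Int) (out : Bool) : Prop := out = check_sumEven_alt n
instance (n : Int) (out : Bool) : Decidable (Spec_check_sumEven n out) := by unfold Spec_check_sumEven; infer_instance

-- ===== CLAIM (what is proved, stated in full; the proofs are below) =====
def Claim_equal_check_sumEven : Prop := ∀ (n : Int), Dom_check_sumEven n → Pre_check_sumEven n → Spec_check_sumEven n (check_sumEven n)

-- ===== LEMMAS AND PROOFS =====

-- the arithmetic digit sum both programs compute
def pvDsum (n : Nat) : Int :=
  if n = 0 then 0 else (n % 10 : Nat) + pvDsum (n / 10)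
decreasing_by exact Nat.div_lt_self (Nat.pos_of_ne_zero (by assumption)) (by norm_num)

lemma loop_eq_dsum : ∀ (f : Nat) (n : Nat) (cum : Int), n < f →
    check_sumEvenLoop f (n : Int) cum = cum + pvDsum n := by
  intro f
  induction f with
  | zero => intro n cum h; omega
  | succ f ih =>
    intro n cum h
    by_cases hn : n = 0
    · subst hn; simp [check_sumEvenLoop, pvDsum]
    · rw [check_sumEvenLoop]
      rw [if_neg (by exact_mod_cast hn)]
      have hfd : PySem.Int.floordiv (n : Int) 10 = ((n / 10 : Nat) : Int) := by
        exact_mod_cast PySem.Int.floordiv_natCast n 10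
      have hmd : PySem.Int.mod (n : Int) 10 = ((n % 10 : Nat) : Int) := by
        exact_mod_cast PySem.Int.mod_natCast n 10
      have hps : pvDsum n = ((n % 10 : Nat) : Int) + pvDsum (n / 10) := by
        rw [pvDsum, if_neg hn]
      rw [hfd, hmd, ih (n / 10) _ (by omega), hps]
      ring

lemma digitChar_val {d : Nat} (hd : d < 10) :
    (PySem.Int.ofChars? [Nat.digitChar d]).getD 0 = (d : Int) := by
  interval_cases d <;> decide

lemma toDigitsCore_sum : ∀ (f : Nat) (n : Nat) (l : List Char), n < f →
    ((Nat.toDigitsCore 10 f n l).map (fun c => (PySem.Int.ofChars? [c]).getD 0)).sum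
      = pvDsum n + ((l.map (fun c => (PySem.Int.ofChars? [c]).getD 0)).sum) := by
  intro f
  induction f with
  | zero => intro n l h; omega
  | succ f ih =>
    intro n l h
    rw [Nat.toDigitsCore]
    by_cases h10 : n / 10 = 0
    · rw [if_pos h10]
      have hd : n % 10 < 10 := Nat.mod_lt _ (by norm_num)
      rw [List.map_cons, List.sum_cons, digitChar_val hd]
      by_cases hn : n = 0
      · subst hn; simp [pvDsum]
      · rw [pvDsum, if_neg hn, h10, pvDsum]
        simp [add_comm]
    · rw [if_neg h10]
      have hn : n ≠ 0 := by intro hn; subst hn; simp at h10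
      rw [ih (n / 10) _ (by have := Nat.div_lt_self (Nat.pos_of_ne_zero hn) (show 1 < 10 by norm_num); omega)]
      have hd : n % 10 < 10 := Nat.mod_lt _ (by norm_num)
      have hps : pvDsum n = ((n % 10 : Nat) : Int) + pvDsum (n / 10) := by
        rw [pvDsum, if_neg hn]
      rw [List.map_cons, List.sum_cons, digitChar_val hd, hps]
      ring

lemma alt_eq_dsum (n : Int) (hn : 0 ≤ n) :
    check_sumEven_alt n = decide (PySem.Int.mod (pvDsum n.toNat) 2 = 0) := by
  unfold check_sumEven_alt
  have h1 : (PySem.Int.toStr n).toList = PySem.Int.toChars n := PySem.Int.toList_toStr n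
  have h2 : PySem.Int.toChars n = Nat.toDigits 10 n.toNat := by
    unfold PySem.Int.toChars
    rw [if_neg (not_lt.mpr hn)]
  rw [h1, h2, Nat.toDigits, toDigitsCore_sum (n.toNat + 1) n.toNat [] (by omega)]
  simp

-- ===== VERDICT (by name: the statement is the Claim_ definition above) =====
theorem check_sumEven_spec : Claim_equal_check_sumEven := by
  intro n _ hpre
  have hpre' : (0:Int) ≤ n := hpre
  obtain ⟨m, rfl⟩ : ∃ m : Nat, n = (m : Int) := ⟨n.toNat, by omega⟩
  unfold Spec_check_sumEven
  unfold check_sumEven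
  rw [alt_eq_dsum _ hpre']
  simp only [Int.natAbs_natCast, Int.toNat_natCast,
    loop_eq_dsum (m + 1) m 0 (by omega), zero_add]
  split_ifs with h
  · exact (decide_eq_true h).symm
  · exact (decide_eq_false h).symm
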